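-- pv_equiv track=rewrite | github.com/djmahe4/footytacticzz | player_number_detector/player_number_detector.py | group_digits
-- ===== SOURCE A (Python) =====
-- def group_digits(number_boxes, number_confidences, number_class_ids, threshold_distance=15):
--     # Sort number_boxes and corresponding confidences/class_ids by x1 coordinate to ensure left-to-right reading
--     sorted_digits = sorted(zip(number_boxes, number_confidences, number_class_ids), key=lambda x: x[0][0])
--
--     grouped_digits = []
--     current_group = ''
--     last_x2 = 0
--
--     for number_box, number_confidence, number_class_id in sorted_digits:
--         nx1, ny1, nx2, ny2 = int(number_box[0]), int(number_box[1]), int(number_box[2]), int(number_box[3])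
--
--         # Group digits based on proximity in the x-axis
--         if nx1 - last_x2 < threshold_distance:
--             current_group += str(int(number_class_id))
--         else:
--             if current_group:
--                 grouped_digits.append(current_group)
--             current_group = str(int(number_class_id))
--
--         last_x2 = nx2
--
--     if current_group:
--         grouped_digits.append(current_group)
--
--     return grouped_digits
-- ===== SOURCE B (Python) =====
-- def group_digits(number_boxes, number_confidences, number_class_ids, threshold_distance=15):
--     # Sort by x1 (same stable ordering as before)
--     digits = sorted(zip(number_boxes, number_confidences, number_class_ids), key=lambda t: t[0][0])
--
--     # Pass 1: assign each digit an integer group id, incremented whenever the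
--     # gap to the previous box's right edge reaches the threshold.
--     ids = []
--     gid = 0
--     last_x2 = 0
--     first = True
--     for box, _conf, _cid in digits:
--         if not first and int(box[0]) - last_x2 >= threshold_distance:
--             gid += 1
--         first = False
--         ids.append(gid)
--         last_x2 = int(box[2])
--
--     # Pass 2: join the class-id strings of consecutive runs of equal group ids.
--     out = []
--     prev = None
--     for g, (_box, _conf, cid) in zip(ids, digits):
--         s = str(int(cid))
--         if g == prev:
--             out[-1] += s
--         else:
--             out.append(s)
--         prev = g
--     return out
-- ===== Notes on version B (the rewrite author's own statement) =====
-- stated objective: alternative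
-- what changed: A's single fused loop that accumulates a current string and flushes non-empty groups is replaced by two passes: first assign each sorted digit an integer group id by the gap test, then join consecutive runs of equal ids into strings.
import Mathlib
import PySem

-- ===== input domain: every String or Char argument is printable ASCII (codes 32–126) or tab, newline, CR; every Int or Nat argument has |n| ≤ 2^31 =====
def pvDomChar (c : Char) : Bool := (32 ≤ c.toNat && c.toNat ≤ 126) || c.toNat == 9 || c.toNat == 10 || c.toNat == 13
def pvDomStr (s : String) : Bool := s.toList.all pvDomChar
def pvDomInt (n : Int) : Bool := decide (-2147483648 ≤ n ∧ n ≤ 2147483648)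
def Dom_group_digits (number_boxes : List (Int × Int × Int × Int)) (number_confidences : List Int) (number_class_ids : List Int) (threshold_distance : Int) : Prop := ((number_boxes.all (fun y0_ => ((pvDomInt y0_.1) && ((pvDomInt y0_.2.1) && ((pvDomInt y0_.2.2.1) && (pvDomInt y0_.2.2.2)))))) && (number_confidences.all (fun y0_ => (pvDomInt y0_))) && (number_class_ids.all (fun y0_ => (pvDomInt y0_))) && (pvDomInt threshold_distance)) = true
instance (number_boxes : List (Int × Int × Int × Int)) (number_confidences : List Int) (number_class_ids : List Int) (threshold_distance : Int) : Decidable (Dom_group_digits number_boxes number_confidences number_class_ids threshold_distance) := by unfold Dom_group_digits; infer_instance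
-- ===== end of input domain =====

-- B replaces A's fused accumulate-and-flush loop by two passes (assign integer group ids,
-- then join consecutive runs of equal ids); objective: alternative decomposition, same cost.

-- ===== PORT A =====
-- one loop step of A: state = (grouped_digits, current_group, last_x2)
def pvStepA (threshold_distance : Int)
    (st : List String × String × Int) (t : (Int × Int × Int × Int) × Int × Int) :
    List String × String × Int :=
  let nx1 := t.1.1
  let nx2 := t.1.2.2.1
  if nx1 - st.2.2 < threshold_distance then
    (st.1, st.2.1 ++ PySem.Int.toStr t.2.2, nx2)
  else
    ((if st.2.1 = "" then st.1 else st.1 ++ [st.2.1]), PySem.Int.toStr t.2.2, nx2)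

def group_digits (number_boxes : List (Int × Int × Int × Int)) (number_confidences : List Int) (number_class_ids : List Int) (threshold_distance : Int) : List String :=
  let sorted_digits := PySem.List.sorted (number_boxes.zip (number_confidences.zip number_class_ids)) (fun x => x.1.1)
  let st := sorted_digits.foldl (pvStepA threshold_distance) ([], "", 0)
  if st.2.1 = "" then st.1 else st.1 ++ [st.2.1]

-- ===== PORT B =====
-- pass 1 step: state = (ids, gid, last_x2, first)
def pvStepB1 (threshold_distance : Int)
    (st : List Int × Int × Int × Bool) (t : (Int × Int × Int × Int) × Int × Int) :
    List Int × Int × Int × Bool :=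
  let gid' := if st.2.2.2 = false ∧ threshold_distance ≤ t.1.1 - st.2.2.1 then st.2.1 + 1 else st.2.1
  (st.1 ++ [gid'], gid', t.1.2.2.1, false)

-- pass 2 step: state = (out, prev)
def pvStepB2 (st : List String × Option Int) (gt : Int × (Int × Int × Int × Int) × Int × Int) :
    List String × Option Int :=
  let s := PySem.Int.toStr gt.2.2.2
  if some gt.1 = st.2 then (st.1.dropLast ++ [(st.1.getLast?.getD "") ++ s], some gt.1)
  else (st.1 ++ [s], some gt.1)

def group_digits_alt (number_boxes : List (Int × Int × Int × Int)) (number_confidences : List Int) (number_class_ids : List Int) (threshold_distance : Int) : List String :=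
  let digits := PySem.List.sorted (number_boxes.zip (number_confidences.zip number_class_ids)) (fun x => x.1.1)
  let p := digits.foldl (pvStepB1 threshold_distance) ([], 0, 0, true)
  let q := (p.1.zip digits).foldl pvStepB2 ([], none)
  q.1

-- ===== PRECONDITION & SPEC =====
def Spec_group_digits (number_boxes : List (Int × Int × Int × Int)) (number_confidences : List Int) (number_class_ids : List Int) (threshold_distance : Int) (out : List String) : Prop := out = group_digits_alt number_boxes number_confidences number_class_ids threshold_distance
instance (number_boxes : List (Int × Int × Int × Int)) (number_confidences : List Int) (number_class_ids : List Int) (threshold_distance : Int) (out : List String) : Decidable (Spec_group_digits number_boxes number_confidences number_class_ids threshold_distance out) := by unfold Spec_group_digits; infer_instance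

-- ===== CLAIM (what is proved, stated in full; the proofs are below) =====
def Claim_equal_group_digits : Prop := ∀ (number_boxes : List (Int × Int × Int × Int)) (number_confidences : List Int) (number_class_ids : List Int) (threshold_distance : Int), Dom_group_digits number_boxes number_confidences number_class_ids threshold_distance → Spec_group_digits number_boxes number_confidences number_class_ids threshold_distance (group_digits number_boxes number_confidences number_class_ids threshold_distance)

-- ===== LEMMAS AND PROOFS =====

-- str(int(cid)) is never the empty string
lemma toDigitsCore_cons_ne_nil (b : Nat) : ∀ (f n : Nat) (c : Char) (l : List Char),
    Nat.toDigitsCore b f n (c :: l) ≠ [] := by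
  intro f
  induction f with
  | zero => intro n c l; simp [Nat.toDigitsCore]
  | succ f ih =>
    intro n c l
    simp only [Nat.toDigitsCore]
    split
    · simp
    · exact ih _ _ _

lemma toDigits_ne_nil (b n : Nat) : Nat.toDigits b n ≠ [] := by
  simp only [Nat.toDigits, Nat.toDigitsCore]
  split
  · simp
  · exact toDigitsCore_cons_ne_nil b _ _ _ _

lemma toStr_ne_empty (n : Int) : PySem.Int.toStr n ≠ "" := by
  intro h
  have h2 : PySem.Int.toChars n = [] := by
    rw [← PySem.Int.toList_toStr, h]
    simp
  unfold PySem.Int.toChars at h2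
  split at h2
  · simp at h2
  · exact toDigits_ne_nil _ _ h2

lemma str_append_ne_empty (a b : String) (h : a ≠ "") : a ++ b ≠ "" := by
  intro hc
  have h2 : a = "" ∧ b = "" := by
    have := congrArg String.toList hc
    simpa using this
  exact h h2.1

-- the ids B's first pass assigns after the first element (first = false)
def pvIds (td : Int) : List ((Int × Int × Int × Int) × Int × Int) → Int → Int → List Int
  | [], _, _ => []
  | t :: l, gid, lx =>
    let gid' := if td ≤ t.1.1 - lx then gid + 1 else gid
    gid' :: pvIds td l gid' t.1.2.2.1

lemma pass1_ids (td : Int) : ∀ (l : List ((Int × Int × Int × Int) × Int × Int))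
    (ids0 : List Int) (gid lx : Int),
    (l.foldl (pvStepB1 td) (ids0, gid, lx, false)).1 = ids0 ++ pvIds td l gid lx := by
  intro l
  induction l with
  | nil => intro ids0 gid lx; simp [pvIds]
  | cons t l ih =>
    intro ids0 gid lx
    simp only [List.foldl_cons, pvStepB1, pvIds]
    by_cases h : td ≤ t.1.1 - lx
    · simp [h, ih]
    · simp [h, ih]

-- main invariant: A's flush-at-the-end loop from (out, cur, lx), cur ≠ "",
-- equals B's pass 2 over the ids of pass 1, from (out ++ [cur], some gid).
lemma main_inv (td : Int) : ∀ (l : List ((Int × Int × Int × Int) × Int × Int))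
    (out : List String) (cur : String) (gid lx : Int), cur ≠ "" →
    (let st := l.foldl (pvStepA td) (out, cur, lx)
     if st.2.1 = "" then st.1 else st.1 ++ [st.2.1])
    = (((pvIds td l gid lx).zip l).foldl pvStepB2 (out ++ [cur], some gid)).1 := by
  intro l
  induction l with
  | nil =>
    intro out cur gid lx hcur
    simp [hcur]
  | cons t l ih =>
    intro out cur gid lx hcur
    by_cases h : t.1.1 - lx < td
    · have h' : ¬ td ≤ t.1.1 - lx := by omega
      simp only [pvIds, h', if_false, List.zip_cons_cons, List.foldl_cons,
        pvStepA, h, if_true, pvStepB2,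
        List.dropLast_concat, List.getLast?_concat, Option.getD_some]
      exact ih out (cur ++ PySem.Int.toStr t.2.2) gid t.1.2.2.1
        (str_append_ne_empty _ _ hcur)
    · have h' : td ≤ t.1.1 - lx := by omega
      have hne : ¬ (some (gid + 1) = some gid) := by simp
      simp only [pvIds, h', if_true, List.zip_cons_cons, List.foldl_cons,
        pvStepA, h, if_false, hcur, pvStepB2, if_neg hne]
      exact ih (out ++ [cur]) (PySem.Int.toStr t.2.2) (gid + 1) t.1.2.2.1
        (toStr_ne_empty _)

-- ===== VERDICT (by name: the statement is the Claim_ definition above) =====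
theorem group_digits_spec : Claim_equal_group_digits := by
  intro number_boxes number_confidences number_class_ids threshold_distance _
  unfold Spec_group_digits group_digits group_digits_alt
  generalize PySem.List.sorted (number_boxes.zip (number_confidences.zip number_class_ids)) (fun x => x.1.1) = ds
  cases ds with
  | nil => simp
  | cons t l =>
    simp only [List.foldl_cons]
    have hA : pvStepA threshold_distance ([], "", 0) t
        = ([], PySem.Int.toStr t.2.2, t.1.2.2.1) := by
      unfold pvStepA
      split <;> simp_all
    have hB1 : pvStepB1 threshold_distance ([], 0, 0, true) t
        = ([0], 0, t.1.2.2.1, false) := by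
      simp [pvStepB1]
    rw [hA, hB1, pass1_ids]
    simp only [List.singleton_append, List.zip_cons_cons, List.foldl_cons]
    have hB2 : pvStepB2 ([], none) (0, t)
        = ([PySem.Int.toStr t.2.2], some 0) := by
      simp [pvStepB2]
    rw [hB2]
    exact main_inv threshold_distance l [] (PySem.Int.toStr t.2.2) 0 t.1.2.2.1
      (toStr_ne_empty _)
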